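-- pv_equiv track=rewrite | github.com/ngongocthinh159/compare-intel | inter_sort_broker_priority.py | _normalize_sheet_tokens
-- ===== SOURCE A (Python) =====
-- from typing import List
--
-- def _normalize_sheet_tokens(tokens: List[str]) -> List[str]:
--     """Split comma-separated tokens and strip whitespace."""
--     out: List[str] = []
--     for tok in tokens:
--         for piece in str(tok).split(","):
--             piece = piece.strip()
--             if piece:
--                 out.append(piece)
--     return out
-- ===== SOURCE B (Python) =====
-- from typing import List
--
-- def _normalize_sheet_tokens(tokens: List[str]) -> List[str]:
--     """Single character-level scan: buffer pending whitespace, flush pieces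
--     at commas and token ends; no split()/strip() calls."""
--     out: List[str] = []
--     for tok in tokens:
--         cur: List[str] = []   # current piece, leading whitespace never enters
--         pend: List[str] = []  # whitespace seen since last non-space char
--         for ch in str(tok):
--             if ch == ',':
--                 if cur:
--                     out.append(''.join(cur))
--                 cur = []
--                 pend = []
--             elif ch.isspace():
--                 if cur:
--                     pend.append(ch)
--             else:
--                 cur.extend(pend)
--                 pend = []
--                 cur.append(ch)
--         if cur:
--             out.append(''.join(cur))
--     return out
-- ===== Notes on version B (the rewrite author's own statement) =====
-- stated objective: alternative
-- what changed: B replaces A's split-on-comma/strip/filter pipeline with a single character-level state machine that scans each token once, skipping leading whitespace, buffering pending internal whitespace, and flushing the current piece at each comma and at token end.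
import Mathlib
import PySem

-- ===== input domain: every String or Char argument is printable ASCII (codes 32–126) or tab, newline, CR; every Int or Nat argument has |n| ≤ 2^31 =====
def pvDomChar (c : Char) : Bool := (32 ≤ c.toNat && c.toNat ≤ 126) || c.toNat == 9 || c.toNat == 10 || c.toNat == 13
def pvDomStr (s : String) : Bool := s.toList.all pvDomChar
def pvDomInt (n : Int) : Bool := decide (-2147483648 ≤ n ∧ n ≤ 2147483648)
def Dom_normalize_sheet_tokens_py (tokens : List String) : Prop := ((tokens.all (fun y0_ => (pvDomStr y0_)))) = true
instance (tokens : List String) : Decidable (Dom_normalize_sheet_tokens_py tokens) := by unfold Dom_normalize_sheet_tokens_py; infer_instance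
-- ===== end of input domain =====

-- B replaces A's split-on-comma/strip/filter pipeline with a single character-level
-- state machine over each token, buffering pending whitespace and flushing at commas
-- and token ends (alternative decomposition, same cost).

-- ===== PORT A =====
-- for tok in tokens: for piece in tok.split(","): piece = piece.strip(); if piece: out.append(piece)
def normalize_sheet_tokens_py (tokens : List String) : List String :=
  tokens.foldl (fun out tok =>
    (PySem.Chars.splitOn tok.toList [',']).foldl (fun out piece =>
      if PySem.Chars.strip piece = [] then out
      else out ++ [String.ofList (PySem.Chars.strip piece)]) out) []

-- ===== PORT B =====
-- one step of Source B's inner character loop: state = (out, cur, pend)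
def pvStep (s : List String × List Char × List Char) (ch : Char) :
    List String × List Char × List Char :=
  match s with
  | (out, cur, pend) =>
    if ch = ',' then
      ((if cur = [] then out else out ++ [String.ofList cur]), ([] : List Char), ([] : List Char))
    else if PySem.Chars.isspace ch then
      (out, cur, if cur = [] then pend else pend ++ [ch])
    else
      (out, cur ++ pend ++ [ch], ([] : List Char))

def normalize_sheet_tokens_py_alt (tokens : List String) : List String :=
  tokens.foldl (fun out tok =>
    match tok.toList.foldl pvStep (out, ([] : List Char), ([] : List Char)) with
    | (out', cur, _) => if cur = [] then out' else out' ++ [String.ofList cur]) []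

-- ===== PRECONDITION & SPEC =====
def Spec_normalize_sheet_tokens_py (tokens : List String) (out : List String) : Prop := out = normalize_sheet_tokens_py_alt tokens
instance (tokens : List String) (out : List String) : Decidable (Spec_normalize_sheet_tokens_py tokens out) := by unfold Spec_normalize_sheet_tokens_py; infer_instance

-- ===== CLAIM (what is proved, stated in full; the proofs are below) =====
def Claim_equal_normalize_sheet_tokens_py : Prop := ∀ (tokens : List String), Dom_normalize_sheet_tokens_py tokens → Spec_normalize_sheet_tokens_py tokens (normalize_sheet_tokens_py tokens)

-- ===== LEMMAS AND PROOFS =====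

-- simple structural recursion computing s.split(c) for a one-character separator
def splitChar (c : Char) : List Char → List (List Char)
  | [] => [[]]
  | x :: xs =>
    if x = c then [] :: splitChar c xs
    else
      match splitChar c xs with
      | [] => [[x]]
      | p :: ps => (x :: p) :: ps

lemma splitChar_ne_nil (c : Char) (l : List Char) : splitChar c l ≠ [] := by
  induction l with
  | nil => simp [splitChar]
  | cons x xs ih =>
    simp only [splitChar]
    split_ifs
    · simp
    · cases h : splitChar c xs <;> simp

-- prepend a prefix onto the first piece
def consHead (pre : List Char) : List (List Char) → List (List Char)
  | [] => [pre]
  | p :: ps => (pre ++ p) :: ps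

lemma splitOn_go_eq (c : Char) : ∀ (fuel : Nat) (l cur : List Char) (acc : List (List Char)),
    l.length < fuel →
    PySem.Chars.splitOn.go [c] fuel l cur acc = acc.reverse ++ consHead cur.reverse (splitChar c l) := by
  intro fuel
  induction fuel with
  | zero => intro l cur acc h; omega
  | succ fuel ih =>
    intro l cur acc h
    cases l with
    | nil => simp [PySem.Chars.splitOn.go, consHead, splitChar]
    | cons x rest =>
      simp only [PySem.Chars.splitOn.go]
      by_cases hx : x = c
      · have hpre : List.isPrefixOf [c] (x :: rest) = true := by
          simp [List.isPrefixOf, hx]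
        rw [if_pos hpre]
        have := ih rest [] (cur.reverse :: acc) (by simpa using Nat.lt_of_succ_lt_succ h)
        simp only [List.length_cons] at this
        simp only [List.drop_succ_cons, List.length_singleton, List.drop_zero] at *
        rw [this]
        have hne := splitChar_ne_nil c rest
        cases hr : splitChar c rest with
        | nil => exact absurd hr hne
        | cons p ps => simp [splitChar, hx, consHead, hr]
      · have hpre : List.isPrefixOf [c] (x :: rest) = false := by
          simp [List.isPrefixOf]
          intro hcx; exact absurd hcx.symm hx
        rw [if_neg (by simp [hpre])]
        have := ih rest (x :: cur) acc (by simpa using Nat.lt_of_succ_lt_succ h)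
        rw [this]
        have hne := splitChar_ne_nil c rest
        cases hr : splitChar c rest with
        | nil => exact absurd hr hne
        | cons p ps => simp [splitChar, hx, consHead, hr]

lemma splitOn_eq_splitChar (c : Char) (l : List Char) :
    PySem.Chars.splitOn l [c] = splitChar c l := by
  unfold PySem.Chars.splitOn
  rw [splitOn_go_eq c (l.length + 1) l [] [] (Nat.lt_succ_self _)]
  have hne := splitChar_ne_nil c l
  cases hr : splitChar c l with
  | nil => exact absurd hr hne
  | cons p ps => simp [consHead]

-- the shared strip-and-filter pass, as a function of the piece list
def normPieces (pieces : List (List Char)) : List String :=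
  ((pieces.map PySem.Chars.strip).filter (· ≠ [])).map String.ofList

lemma normPieces_append (a b : List (List Char)) :
    normPieces (a ++ b) = normPieces a ++ normPieces b := by
  simp [normPieces, List.filter_append]

lemma foldl_eq_normPieces (acc : List String) (pieces : List (List Char)) :
    pieces.foldl (fun out piece =>
      if PySem.Chars.strip piece = [] then out
      else out ++ [String.ofList (PySem.Chars.strip piece)]) acc
    = acc ++ normPieces pieces := by
  induction pieces generalizing acc with
  | nil => simp [normPieces]
  | cons p ps ih =>
    simp only [List.foldl_cons]
    by_cases hp : PySem.Chars.strip p = []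
    · simp [hp, ih, normPieces]
    · simp [hp, ih acc, ih (acc ++ _), normPieces, List.filter_cons, hp]

lemma portA_eq (tokens : List String) :
    normalize_sheet_tokens_py tokens
      = normPieces (tokens.flatMap (fun t => splitChar ',' t.toList)) := by
  unfold normalize_sheet_tokens_py
  have : ∀ (acc : List String) (ts : List String),
      ts.foldl (fun out tok =>
        (PySem.Chars.splitOn tok.toList [',']).foldl (fun out piece =>
          if PySem.Chars.strip piece = [] then out
          else out ++ [String.ofList (PySem.Chars.strip piece)]) out) acc
      = acc ++ normPieces (ts.flatMap (fun t => splitChar ',' t.toList)) := by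
    intro acc ts
    induction ts generalizing acc with
    | nil => simp [normPieces]
    | cons t ts ih =>
      rw [List.foldl_cons, splitOn_eq_splitChar, foldl_eq_normPieces, ih,
        List.flatMap_cons, normPieces_append, List.append_assoc]
  simpa using this [] tokens

-- ===== B-side lemmas: the scanner computes strip of the raw prefix =====

-- pending whitespace after scanning raw prefix r (trailing whitespace of lstrip r)
def pendOf (r : List Char) : List Char :=
  (((PySem.Chars.lstrip r).reverse).takeWhile PySem.Chars.isspace).reverse

def pvFinish (s : List String × List Char × List Char) : List String :=
  match s with
  | (out, cur, _) => if cur = [] then out else out ++ [String.ofList cur]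

lemma dropWhile_head_false {α : Type} (p : α → Bool) :
    ∀ (l : List α) (a : α) (t : List α), List.dropWhile p l = a :: t → p a = false := by
  intro l
  induction l with
  | nil => intro a t h; simp [List.dropWhile] at h
  | cons x xs ih =>
    intro a t h
    by_cases hp : p x
    · rw [List.dropWhile_cons_of_pos hp] at h; exact ih _ _ h
    · rw [List.dropWhile_cons_of_neg hp] at h
      cases h; simpa using hp

lemma strip_pend (r : List Char) :
    PySem.Chars.strip r ++ pendOf r = PySem.Chars.lstrip r := by
  have h := congrArg List.reverse
    (List.takeWhile_append_dropWhile (p := PySem.Chars.isspace)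
      (l := (PySem.Chars.lstrip r).reverse))
  rw [List.reverse_append, List.reverse_reverse] at h
  unfold PySem.Chars.strip PySem.Chars.rstrip pendOf
  exact h

lemma strip_nil_iff (r : List Char) :
    PySem.Chars.strip r = [] ↔ PySem.Chars.lstrip r = [] := by
  constructor
  · intro h
    by_contra hne
    cases hl : PySem.Chars.lstrip r with
    | nil => exact hne hl
    | cons a t =>
      have ha : PySem.Chars.isspace a = false :=
        dropWhile_head_false _ r a t (by simpa [PySem.Chars.lstrip] using hl)
      have : a ∈ PySem.Chars.strip r ++ pendOf r := by
        rw [strip_pend, hl]; simp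
      rw [h] at this
      simp only [List.nil_append, pendOf] at this
      have := List.mem_takeWhile_imp (List.mem_reverse.mp (by simpa using this))
      simp [ha] at this
  · intro h; simp [PySem.Chars.strip, h, PySem.Chars.rstrip]

lemma lstrip_append_one (r : List Char) (x : Char) :
    PySem.Chars.lstrip (r ++ [x]) =
      if PySem.Chars.lstrip r = [] then PySem.Chars.lstrip [x]
      else PySem.Chars.lstrip r ++ [x] := by
  simp only [PySem.Chars.lstrip, List.dropWhile_append]
  split_ifs with h1 h2 h3 <;> simp_all [List.isEmpty_iff]

lemma rstrip_append_ws (y : List Char) (x : Char) (hx : PySem.Chars.isspace x = true) :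
    PySem.Chars.rstrip (y ++ [x]) = PySem.Chars.rstrip y := by
  simp [PySem.Chars.rstrip, hx]

lemma rstrip_append_nonws (y : List Char) (x : Char) (hx : PySem.Chars.isspace x = false) :
    PySem.Chars.rstrip (y ++ [x]) = y ++ [x] := by
  simp [PySem.Chars.rstrip, List.dropWhile, hx]

-- whitespace step: strip unchanged
lemma strip_append_ws (r : List Char) (x : Char) (hx : PySem.Chars.isspace x = true) :
    PySem.Chars.strip (r ++ [x]) = PySem.Chars.strip r := by
  unfold PySem.Chars.strip
  rw [lstrip_append_one]
  split_ifs with h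
  · rw [h]
    simp only [PySem.Chars.lstrip, List.dropWhile, hx, List.dropWhile_nil, PySem.Chars.rstrip,
      List.reverse_nil]
  · exact rstrip_append_ws _ _ hx

lemma pendOf_append_ws (r : List Char) (x : Char) (hx : PySem.Chars.isspace x = true)
    (hne : PySem.Chars.lstrip r ≠ []) :
    pendOf (r ++ [x]) = pendOf r ++ [x] := by
  unfold pendOf
  rw [lstrip_append_one, if_neg hne]
  simp [List.takeWhile, hx]

lemma pendOf_nil_of_lstrip_nil (r : List Char) (h : PySem.Chars.lstrip r = []) :
    pendOf r = [] := by
  simp [pendOf, h]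

lemma lstrip_append_ws_nil (r : List Char) (x : Char) (hx : PySem.Chars.isspace x = true)
    (h : PySem.Chars.lstrip r = []) : PySem.Chars.lstrip (r ++ [x]) = [] := by
  rw [lstrip_append_one, if_pos h]
  simp only [PySem.Chars.lstrip, List.dropWhile, hx, List.dropWhile_nil]

-- non-whitespace step: strip becomes lstrip r ++ [x], pend empties
lemma strip_append_nonws (r : List Char) (x : Char) (hx : PySem.Chars.isspace x = false) :
    PySem.Chars.strip (r ++ [x]) = PySem.Chars.lstrip r ++ [x] := by
  unfold PySem.Chars.strip
  rw [lstrip_append_one]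
  split_ifs with h
  · rw [h]
    simp only [PySem.Chars.lstrip, List.dropWhile, hx, List.nil_append]
    exact rstrip_append_nonws [] x hx
  · exact rstrip_append_nonws _ _ hx

lemma pendOf_append_nonws (r : List Char) (x : Char) (hx : PySem.Chars.isspace x = false) :
    pendOf (r ++ [x]) = [] := by
  unfold pendOf
  rw [lstrip_append_one]
  split_ifs with h
  · simp [PySem.Chars.lstrip, List.dropWhile, hx, List.takeWhile]
  · simp [List.takeWhile, hx]

lemma normPieces_one (r : List Char) :
    normPieces [r] = if PySem.Chars.strip r = [] then [] else [String.ofList (PySem.Chars.strip r)] := by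
  simp [normPieces, List.filter_cons]
  split_ifs with h <;> simp_all

-- the scanner invariant: the state after raw prefix r is (strip r, pendOf r)
lemma scanG : ∀ (l : List Char) (out : List String) (r : List Char),
    pvFinish (l.foldl pvStep (out, PySem.Chars.strip r, pendOf r))
      = out ++ normPieces (consHead r (splitChar ',' l)) := by
  intro l
  induction l with
  | nil =>
    intro out r
    simp only [List.foldl_nil, pvFinish, splitChar, consHead, List.append_nil, normPieces_one]
    split_ifs with h <;> simp [h]
  | cons x xs ih =>
    intro out r
    rw [List.foldl_cons]
    by_cases hx : x = ','
    · have hstep : pvStep (out, PySem.Chars.strip r, pendOf r) x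
          = (out ++ normPieces [r], PySem.Chars.strip [], pendOf []) := by
        simp only [pvStep, if_pos hx, normPieces_one]
        split_ifs with h <;>
          simp [PySem.Chars.strip, PySem.Chars.lstrip, PySem.Chars.rstrip, pendOf]
      rw [hstep, ih (out ++ normPieces [r]) []]
      have hne := splitChar_ne_nil ',' xs
      cases hr : splitChar ',' xs with
      | nil => exact absurd hr hne
      | cons p ps =>
        subst hx
        simp only [splitChar, hr, consHead, List.nil_append]
        rw [List.append_assoc, ← normPieces_append]
        simp [normPieces]
    · have hsplit : consHead r (splitChar ',' (x :: xs)) = consHead (r ++ [x]) (splitChar ',' xs) := by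
        have hne := splitChar_ne_nil ',' xs
        cases hr : splitChar ',' xs with
        | nil => exact absurd hr hne
        | cons p ps => simp [splitChar, hx, hr, consHead]
      by_cases hws : PySem.Chars.isspace x = true
      · have hstep : pvStep (out, PySem.Chars.strip r, pendOf r) x
            = (out, PySem.Chars.strip (r ++ [x]), pendOf (r ++ [x])) := by
          simp only [pvStep, if_neg hx, if_pos hws]
          by_cases h : PySem.Chars.strip r = []
          · have hl := (strip_nil_iff r).mp h
            rw [if_pos h, strip_append_ws r x hws, h,
              pendOf_nil_of_lstrip_nil _ (lstrip_append_ws_nil r x hws hl),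
              pendOf_nil_of_lstrip_nil _ hl]
          · rw [if_neg h, strip_append_ws r x hws,
              pendOf_append_ws r x hws (fun hl => h ((strip_nil_iff r).mpr hl))]
        rw [hstep, ih out (r ++ [x]), hsplit]
      · have hws' : PySem.Chars.isspace x = false := by simpa using hws
        have hstep : pvStep (out, PySem.Chars.strip r, pendOf r) x
            = (out, PySem.Chars.strip (r ++ [x]), pendOf (r ++ [x])) := by
          simp only [pvStep, if_neg hx, hws', Bool.false_eq_true, if_neg (by simp : ¬False)]
          rw [strip_pend, strip_append_nonws r x hws', pendOf_append_nonws r x hws']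
        rw [hstep, ih out (r ++ [x]), hsplit]

lemma scan_token (l : List Char) (out : List String) :
    pvFinish (l.foldl pvStep (out, [], []))
      = out ++ normPieces (splitChar ',' l) := by
  have h := scanG l out []
  have hs : PySem.Chars.strip ([] : List Char) = [] := rfl
  have hp : pendOf [] = [] := rfl
  rw [hs, hp] at h
  rw [h]
  have hne := splitChar_ne_nil ',' l
  cases hr : splitChar ',' l with
  | nil => exact absurd hr hne
  | cons p ps => simp [consHead]

lemma portB_eq (tokens : List String) :
    normalize_sheet_tokens_py_alt tokens
      = normPieces (tokens.flatMap (fun t => splitChar ',' t.toList)) := by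
  unfold normalize_sheet_tokens_py_alt
  have : ∀ (acc : List String) (ts : List String),
      ts.foldl (fun out tok =>
        match tok.toList.foldl pvStep (out, ([] : List Char), ([] : List Char)) with
        | (out', cur, _) => if cur = [] then out' else out' ++ [String.ofList cur]) acc
      = acc ++ normPieces (ts.flatMap (fun t => splitChar ',' t.toList)) := by
    intro acc ts
    induction ts generalizing acc with
    | nil => simp [normPieces]
    | cons t ts ih =>
      rw [List.foldl_cons]
      have hfin : (match t.toList.foldl pvStep (acc, ([] : List Char), ([] : List Char)) with
          | (out', cur, _) => if cur = [] then out' else out' ++ [String.ofList cur])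
          = pvFinish (t.toList.foldl pvStep (acc, [], [])) := by
        rcases t.toList.foldl pvStep (acc, ([] : List Char), ([] : List Char)) with ⟨o, c, p⟩
        rfl
      rw [hfin, scan_token, ih, List.flatMap_cons, normPieces_append, List.append_assoc]
  simpa using this [] tokens

-- ===== VERDICT (by name: the statement is the Claim_ definition above) =====
theorem normalize_sheet_tokens_py_spec : Claim_equal_normalize_sheet_tokens_py := by
  intro tokens _
  unfold Spec_normalize_sheet_tokens_py
  rw [portA_eq, portB_eq]
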